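-- pv_equiv track=rewrite | github.com/aditcam/CS-B551-EAI | reddysai-adcama-melmath-a1/part1/solver2021.py | rotation_states
-- ===== SOURCE A (Python) =====
-- import copy
--
-- def rotation_states(state):
--     def outer_rotation(state,dir):
--
--         state = copy.deepcopy(state)
--         outer_ring = []
--
--         # Getting all the elements in the outer ring
--         # We referenced this link to understand the extend() method which can be used to concatenate multiple lists into a single list: https://www.w3schools.com/python/ref_list_extend.asp
--         outer_ring.extend(list(state[0][i] for i in range(5)))
--         outer_ring.extend(list(state[i][4] for i in range(1,5)))
--         outer_ring.extend(list(state[4][i] for i in range(3,-1,-1)))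
--         outer_ring.extend(list(state[i][0] for i in range(3,0,-1)))
--
--         if dir =='c':
--             # Shifting the elements by an index
--             outer_ring.insert(0,outer_ring.pop())
--         elif dir == 'cc':
--             outer_ring.insert(len(outer_ring),outer_ring.pop(0))
--
--         # Assigning the shifted values to the outer
--         state[0] = outer_ring[:5]
--         counter=5
--
--         for i in range(1,5):
--             state[i][4] = outer_ring[counter]
--             counter+=1
--
--         for i in range(3,-1,-1):
--             state[4][i] = outer_ring[counter]
--             counter+=1
--
--         for i in range(3,0,-1):
--             state[i][0] = outer_ring[counter]
--             counter+=1
--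
--         return state
--
--     def inner_rotation(state,dir):
--
--         state = copy.deepcopy(state) # We referred to this link to understand the concept of a deep copy in Python : https://www.geeksforgeeks.org/copy-python-deep-copy-shallow-copy/
--         inner_ring = []
--
--         # Getting all the elements in the outer ring
--         inner_ring.extend(list(state[1][i] for i in range(1,4)))
--         inner_ring.extend(list(state[i][3] for i in range(2,4)))
--         inner_ring.extend(list(state[3][i] for i in range(2,0,-1)))
--         inner_ring.extend(list(state[i][1] for i in range(2,1,-1)))
--
--         if dir =='c':
--             # Shifting the elements by an index
--             inner_ring.insert(0,inner_ring.pop())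
--         elif dir == 'cc':
--             inner_ring.insert(len(inner_ring),inner_ring.pop(0))
--
--         counter = 0
--         # Assigning the shifted values to the outer
--         for i in range(1,4):
--             state[1][i] = inner_ring[counter]
--             counter+=1
--
--         for i in range(2,4):
--             state[i][3] = inner_ring[counter]
--             counter+=1
--
--         for i in range(2,0,-1):
--             state[3][i] = inner_ring[counter]
--             counter+=1
--
--         for i in range(2,1,-1):
--             state[i][1] = inner_ring[counter]
--             counter+=1
--
--         return state
--
--     return {'Oc':outer_rotation(state,'c'),'Occ':outer_rotation(state,'cc'),'Ic':inner_rotation(state,'c'),'Icc':inner_rotation(state,'cc')}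
-- ===== SOURCE B (Python) =====
-- def rotation_states(state):
--     # one coordinate-permutation pass per rotation: cell (r,c) on a ring takes the
--     # value of its neighbour along the ring; all reads are from the untouched input
--     outer = ([(0, i) for i in range(5)] + [(i, 4) for i in range(1, 5)]
--              + [(4, i) for i in range(3, -1, -1)] + [(i, 0) for i in range(3, 0, -1)])
--     inner = ([(1, i) for i in range(1, 4)] + [(i, 3) for i in range(2, 4)]
--              + [(3, i) for i in range(2, 0, -1)] + [(2, 1)])
--
--     def rotate(coords, shift):
--         n = len(coords)
--         src = {coords[i]: coords[(i + shift) % n] for i in range(n)}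
--         return [[state[src.get((r, c), (r, c))[0]][src.get((r, c), (r, c))[1]]
--                  for c in range(5)] for r in range(5)]
--
--     return {'Oc': rotate(outer, -1), 'Occ': rotate(outer, 1),
--             'Ic': rotate(inner, -1), 'Icc': rotate(inner, 1)}
-- ===== Notes on version B (the rewrite author's own statement) =====
-- stated objective: simpler
-- what changed: Replaces A's two-phase extract-ring/pop-insert-rotate/write-back mutation code with a single helper that builds each rotated grid in one pass from a coordinate-permutation map read off the untouched input, unifying outer and inner rings.
import Mathlib
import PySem

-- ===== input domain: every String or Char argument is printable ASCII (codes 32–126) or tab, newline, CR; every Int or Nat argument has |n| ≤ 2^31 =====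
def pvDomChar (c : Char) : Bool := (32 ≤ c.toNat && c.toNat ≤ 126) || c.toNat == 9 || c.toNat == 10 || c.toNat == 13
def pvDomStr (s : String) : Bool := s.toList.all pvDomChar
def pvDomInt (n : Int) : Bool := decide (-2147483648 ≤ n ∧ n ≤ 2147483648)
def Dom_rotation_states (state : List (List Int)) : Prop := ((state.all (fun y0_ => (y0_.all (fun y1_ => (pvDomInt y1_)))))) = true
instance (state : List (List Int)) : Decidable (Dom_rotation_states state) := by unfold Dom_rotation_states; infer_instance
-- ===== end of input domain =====

-- B builds each rotated grid in one pass from a coordinate-permutation map instead of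
-- A's extract-ring / pop-insert-rotate / write-back mutation phases (objective: simpler).


-- ===== PORT A =====
-- total read helpers; under Pre_ every index is in range, so the defaults are never used
def pvRow (g : List (List Int)) (i : Int) : List Int := (PySem.List.pyGet? g i).getD []
def pvCell (g : List (List Int)) (i j : Int) : Int := (PySem.List.pyGet? (pvRow g i) j).getD 0
def pvSetCell (g : List (List Int)) (i j : Nat) (v : Int) : List (List Int) :=
  g.set i ((g.getD i []).set j v)

-- outer_ring.insert(0, outer_ring.pop()) / ring.insert(len, ring.pop(0))
def pvShift (ring : List Int) (dir : String) : List Int :=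
  if dir == "c" then
    match PySem.List.pop? ring (-1) with
    | some (x, r) => PySem.List.insert r 0 x
    | none => ring
  else if dir == "cc" then
    match PySem.List.pop? ring 0 with
    | some (x, r) => PySem.List.insert r r.length x
    | none => ring
  else ring

def pvOuterRotation (state : List (List Int)) (dir : String) : List (List Int) :=
  let ring :=
    ((PySem.List.pyRange 0 5 1).map (fun i => pvCell state 0 i))
    ++ ((PySem.List.pyRange 1 5 1).map (fun i => pvCell state i 4))
    ++ ((PySem.List.pyRange 3 (-1) (-1)).map (fun i => pvCell state 4 i))
    ++ ((PySem.List.pyRange 3 0 (-1)).map (fun i => pvCell state i 0))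
  let ring := pvShift ring dir
  let st := state.set 0 (PySem.List.slice ring none (some 5))
  let p := (PySem.List.pyRange 1 5 1).foldl
    (fun (p : List (List Int) × Int) i => (pvSetCell p.1 i.toNat 4 ((PySem.List.pyGet? ring p.2).getD 0), p.2 + 1)) (st, 5)
  let p := (PySem.List.pyRange 3 (-1) (-1)).foldl
    (fun (p : List (List Int) × Int) i => (pvSetCell p.1 4 i.toNat ((PySem.List.pyGet? ring p.2).getD 0), p.2 + 1)) p
  let p := (PySem.List.pyRange 3 0 (-1)).foldl
    (fun (p : List (List Int) × Int) i => (pvSetCell p.1 i.toNat 0 ((PySem.List.pyGet? ring p.2).getD 0), p.2 + 1)) p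
  p.1

def pvInnerRotation (state : List (List Int)) (dir : String) : List (List Int) :=
  let ring :=
    ((PySem.List.pyRange 1 4 1).map (fun i => pvCell state 1 i))
    ++ ((PySem.List.pyRange 2 4 1).map (fun i => pvCell state i 3))
    ++ ((PySem.List.pyRange 2 0 (-1)).map (fun i => pvCell state 3 i))
    ++ ((PySem.List.pyRange 2 1 (-1)).map (fun i => pvCell state i 1))
  let ring := pvShift ring dir
  let p := (PySem.List.pyRange 1 4 1).foldl
    (fun (p : List (List Int) × Int) i => (pvSetCell p.1 1 i.toNat ((PySem.List.pyGet? ring p.2).getD 0), p.2 + 1)) (state, 0)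
  let p := (PySem.List.pyRange 2 4 1).foldl
    (fun (p : List (List Int) × Int) i => (pvSetCell p.1 i.toNat 3 ((PySem.List.pyGet? ring p.2).getD 0), p.2 + 1)) p
  let p := (PySem.List.pyRange 2 0 (-1)).foldl
    (fun (p : List (List Int) × Int) i => (pvSetCell p.1 3 i.toNat ((PySem.List.pyGet? ring p.2).getD 0), p.2 + 1)) p
  let p := (PySem.List.pyRange 2 1 (-1)).foldl
    (fun (p : List (List Int) × Int) i => (pvSetCell p.1 i.toNat 1 ((PySem.List.pyGet? ring p.2).getD 0), p.2 + 1)) p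
  p.1

def rotation_states (state : List (List Int)) : List (String × List (List Int)) :=
  [("Oc", pvOuterRotation state "c"), ("Occ", pvOuterRotation state "cc"),
   ("Ic", pvInnerRotation state "c"), ("Icc", pvInnerRotation state "cc")]

-- ===== PORT B =====
def pvOuterCoords : List (Int × Int) :=
  ((PySem.List.pyRange 0 5 1).map (fun i => ((0 : Int), i)))
  ++ ((PySem.List.pyRange 1 5 1).map (fun i => (i, (4 : Int))))
  ++ ((PySem.List.pyRange 3 (-1) (-1)).map (fun i => ((4 : Int), i)))
  ++ ((PySem.List.pyRange 3 0 (-1)).map (fun i => (i, (0 : Int))))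

def pvInnerCoords : List (Int × Int) :=
  ((PySem.List.pyRange 1 4 1).map (fun i => ((1 : Int), i)))
  ++ ((PySem.List.pyRange 2 4 1).map (fun i => (i, (3 : Int))))
  ++ ((PySem.List.pyRange 2 0 (-1)).map (fun i => ((3 : Int), i)))
  ++ [((2 : Int), (1 : Int))]

def pvRotate (state : List (List Int)) (coords : List (Int × Int)) (shift : Int) : List (List Int) :=
  let n : Int := coords.length
  let src : PySem.Dict (Int × Int) (Int × Int) :=
    (PySem.List.pyRange 0 n 1).foldl
      (fun d i => d.insert ((PySem.List.pyGet? coords i).getD (0, 0))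
                           ((PySem.List.pyGet? coords (PySem.Int.mod (i + shift) n)).getD (0, 0)))
      PySem.Dict.empty
  (PySem.List.pyRange 0 5 1).map (fun r =>
    (PySem.List.pyRange 0 5 1).map (fun c =>
      let p := src.getD (r, c) (r, c)
      pvCell state p.1 p.2))

def rotation_states_alt (state : List (List Int)) : List (String × List (List Int)) :=
  [("Oc", pvRotate state pvOuterCoords (-1)), ("Occ", pvRotate state pvOuterCoords 1),
   ("Ic", pvRotate state pvInnerCoords (-1)), ("Icc", pvRotate state pvInnerCoords 1)]

-- ===== PRECONDITION & SPEC =====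
-- Pre_ restricts to exactly 5x5 grids, the puzzle's domain; on oversized grids A still
-- returns, but its slice assignment truncates row 0 to 5 while passing extra rows and
-- columns through untouched — an accident of A's write-back that no one would specify,
-- and B rebuilds exactly 5x5 grids there.
def Pre_rotation_states (state : List (List Int)) : Prop :=
  state.length = 5 ∧ (state.all (fun r => r.length == 5)) = true
instance (state : List (List Int)) : Decidable (Pre_rotation_states state) := by
  unfold Pre_rotation_states; infer_instance

def pvWitness_rotation_states : List (List Int) :=
  [[0, 1, 2, 3, 4], [5, 6, 7, 8, 9], [10, 11, 12, 13, 14],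
   [15, 16, 17, 18, 19], [20, 21, 22, 23, 24]]

def Spec_rotation_states (state : List (List Int)) (out : List (String × List (List Int))) : Prop := out = rotation_states_alt state
instance (state : List (List Int)) (out : List (String × List (List Int))) : Decidable (Spec_rotation_states state out) := by unfold Spec_rotation_states; infer_instance

-- ===== CLAIM (what is proved, stated in full; the proofs are below) =====
def Claim_equal_rotation_states : Prop := ∀ (state : List (List Int)), Dom_rotation_states state → Pre_rotation_states state → Spec_rotation_states state (rotation_states state)

-- ===== LEMMAS AND PROOFS =====

-- ===== VERDICT (by name: the statement is the Claim_ definition above) =====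
set_option maxHeartbeats 4000000 in
theorem rotation_states_spec : Claim_equal_rotation_states := by
  intro state _ hpre
  obtain ⟨h5, hall⟩ := hpre
  match state, h5 with
  | [r0, r1, r2, r3, r4], _ =>
    simp only [List.all_cons, List.all_nil, Bool.and_true, Bool.and_eq_true, beq_iff_eq] at hall
    obtain ⟨l0, l1, l2, l3, l4⟩ := hall
    match r0, l0 with
    | [a00, a01, a02, a03, a04], _ =>
    match r1, l1 with
    | [a10, a11, a12, a13, a14], _ =>
    match r2, l2 with
    | [a20, a21, a22, a23, a24], _ =>
    match r3, l3 with
    | [a30, a31, a32, a33, a34], _ =>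
    match r4, l4 with
    | [a40, a41, a42, a43, a44], _ =>
      rfl
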